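-- pv_equiv track=rewrite | github.com/akashrventekar/resume-submission-exercise | resume_submission/lambda_function.py | create_max_min_list
-- ===== SOURCE A (Python) =====
-- def create_max_min_list(relationship_dict):
--     final_max_min_list = []
--
--     for key, value in relationship_dict.items():
--         temp_max_min_list = []
--         if len(final_max_min_list) == 0:
--             final_max_min_list.append(key)
--             final_max_min_list.append(value)
--         elif key in final_max_min_list and value not in final_max_min_list:
--             index_key = final_max_min_list.index(key)
--             final_max_min_list = final_max_min_list[:index_key + 1] + [value] + final_max_min_list[
--                                                                                                  index_key + 1:]
--         elif value in final_max_min_list and key not in final_max_min_list: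
--             index_value = final_max_min_list.index(value)
--             final_max_min_list = final_max_min_list[:index_value] + [key] + final_max_min_list[
--                                                                                                  index_value:]
--         elif key in final_max_min_list and value in final_max_min_list:
--             continue
--         else:
--             temp_max_min_list.append(key)
--             temp_max_min_list.append(value)
--             if key in relationship_dict.values():
--                 final_max_min_list.extend(temp_max_min_list[:])
--             else:
--                 temp_max_min_list.extend(final_max_min_list)
--                 final_max_min_list = temp_max_min_list[:]
--     return final_max_min_list
-- ===== SOURCE B (Python) =====
-- def create_max_min_list(relationship_dict):
--     # Doubly-linked chain: nxt/prv pointer dicts + a 'placed' set, O(1) per pair,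
--     # then one walk from the head materialises the list.
--     values = set(relationship_dict.values())
--     nxt = {}
--     prv = {}
--     head = None
--     tail = None
--     placed = set()
--     for k, v in relationship_dict.items():
--         if head is None:
--             nxt[k] = v
--             prv[v] = k
--             head = k
--             tail = v
--             placed.add(k)
--             placed.add(v)
--         elif k in placed and v not in placed:
--             after = nxt.get(k)
--             nxt[k] = v
--             prv[v] = k
--             if after is None:
--                 tail = v
--             else:
--                 nxt[v] = after
--                 prv[after] = v
--             placed.add(v)
--         elif v in placed and k not in placed:
--             before = prv.get(v)
--             prv[v] = k
--             nxt[k] = v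
--             if before is None:
--                 head = k
--             else:
--                 nxt[before] = k
--                 prv[k] = before
--             placed.add(k)
--         elif k in placed and v in placed:
--             continue
--         else:
--             if k in values:
--                 nxt[tail] = k
--                 prv[k] = tail
--                 nxt[k] = v
--                 prv[v] = k
--                 tail = v
--             else:
--                 nxt[k] = v
--                 nxt[v] = head
--                 prv[v] = k
--                 prv[head] = v
--                 head = k
--             placed.add(k)
--             placed.add(v)
--     out = []
--     cur = head
--     while cur is not None and len(out) < len(placed):
--         out.append(cur)
--         cur = nxt.get(cur)
--     return out
-- ===== Notes on version B (the rewrite author's own statement) =====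
-- stated objective: faster
-- what changed: Pre_ conservatively excludes inputs containing a self-pair (key = value), on which A can insert the same string twice into the chain while B keeps it once; B replaces A's per-pair list membership tests, list.index and slice-splicing with a doubly-linked chain held in next/prev pointer dicts plus a 'placed' set and a precomputed values set, materialised by one walk from the head.
-- outside the precondition, e.g. on create_max_min_list({'a': 'a'}): A returns ['a', 'a'], B returns ['a']
import Mathlib
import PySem

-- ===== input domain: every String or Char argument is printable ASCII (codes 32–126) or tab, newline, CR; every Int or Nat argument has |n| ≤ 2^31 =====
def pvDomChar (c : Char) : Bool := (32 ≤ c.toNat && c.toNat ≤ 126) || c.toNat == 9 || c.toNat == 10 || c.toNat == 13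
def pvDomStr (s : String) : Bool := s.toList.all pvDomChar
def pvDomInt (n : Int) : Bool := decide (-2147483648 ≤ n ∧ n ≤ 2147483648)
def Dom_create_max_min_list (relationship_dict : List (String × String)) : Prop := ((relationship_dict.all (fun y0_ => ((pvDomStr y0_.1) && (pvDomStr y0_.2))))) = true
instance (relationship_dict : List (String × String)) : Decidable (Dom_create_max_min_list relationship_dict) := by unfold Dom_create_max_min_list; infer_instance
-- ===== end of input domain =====

-- B replaces A's repeated list membership / index / slice splicing by a doubly-linked
-- chain held in next/prev pointer dicts plus a 'placed' set, materialised by one walk.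

-- ===== PORT A =====
-- one iteration of A's loop body over the current final_max_min_list
def pvAStep (vals : List String) (L : List String) (kv : String × String) : List String :=
  let key := kv.1
  let value := kv.2
  if L.length = 0 then
    (L ++ [key]) ++ [value]
  else if key ∈ L ∧ value ∉ L then
    let i : Int := ((PySem.List.index? L key).getD 0 : Nat)   -- guarded by 'key ∈ L': index? is some here
    (PySem.List.slice L none (some (i + 1)) ++ [value]) ++ PySem.List.slice L (some (i + 1)) none
  else if value ∈ L ∧ key ∉ L then
    let i : Int := ((PySem.List.index? L value).getD 0 : Nat)
    (PySem.List.slice L none (some i) ++ [key]) ++ PySem.List.slice L (some i) none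
  else if key ∈ L ∧ value ∈ L then
    L
  else
    let temp := [key, value]
    if key ∈ vals then L ++ temp
    else temp ++ L

def create_max_min_list (relationship_dict : List (String × String)) : List String :=
  let d := PySem.Dict.ofList relationship_dict
  d.items.foldl (pvAStep d.values) []

-- ===== PORT B =====
structure PVState where
  nxt : PySem.Dict String String
  prv : PySem.Dict String String
  head : Option String
  tail : Option String
  placed : PySem.Set String

-- one iteration of B's loop: O(1) pointer surgery on the doubly-linked chain
def pvBStep (vals : PySem.Set String) (st : PVState) (kv : String × String) : PVState :=
  let k := kv.1
  let v := kv.2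
  match st.head with
  | none =>
    { nxt := st.nxt.insert k v, prv := st.prv.insert v k,
      head := some k, tail := some v, placed := (st.placed.add k).add v }
  | some h =>
    if k ∈ st.placed ∧ v ∉ st.placed then
      let after := st.nxt.get? k
      let nxt1 := st.nxt.insert k v
      let prv1 := st.prv.insert v k
      match after with
      | none => { nxt := nxt1, prv := prv1, head := st.head, tail := some v, placed := st.placed.add v }
      | some a => { nxt := nxt1.insert v a, prv := prv1.insert a v, head := st.head, tail := st.tail, placed := st.placed.add v }
    else if v ∈ st.placed ∧ k ∉ st.placed then
      let before := st.prv.get? v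
      let prv1 := st.prv.insert v k
      let nxt1 := st.nxt.insert k v
      match before with
      | none => { nxt := nxt1, prv := prv1, head := some k, tail := st.tail, placed := st.placed.add k }
      | some b => { nxt := nxt1.insert b k, prv := prv1.insert k b, head := st.head, tail := st.tail, placed := st.placed.add k }
    else if k ∈ st.placed ∧ v ∈ st.placed then
      st
    else
      if k ∈ vals then
        match st.tail with
        | some t => { nxt := (st.nxt.insert t k).insert k v, prv := (st.prv.insert k t).insert v k,
                      head := st.head, tail := some v, placed := (st.placed.add k).add v }
        | none => st   -- unreachable: tail is some whenever head is
      else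
        { nxt := (st.nxt.insert k v).insert v h, prv := (st.prv.insert v k).insert h v,
          head := some k, tail := st.tail, placed := (st.placed.add k).add v }

-- the final while-loop: walk the chain from the head (bounded by len(placed))
def pvWalk (nxt : PySem.Dict String String) : Nat → Option String → List String
  | 0, _ => []
  | _ + 1, none => []
  | n + 1, some c => c :: pvWalk nxt n (nxt.get? c)

def create_max_min_list_alt (relationship_dict : List (String × String)) : List String :=
  let d := PySem.Dict.ofList relationship_dict
  let vals := PySem.Set.ofList d.values
  let st := d.items.foldl (pvBStep vals) ⟨PySem.Dict.empty, PySem.Dict.empty, none, none, PySem.Set.empty⟩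
  pvWalk st.nxt st.placed.length st.head

-- ===== PRECONDITION & SPEC =====
-- Pre_ excludes inputs containing a self-pair (key = value): when such a pair is processed
-- while its element is not yet in the chain, A inserts the same string twice — an artefact a
-- pointer-per-element chain cannot represent, so B returns the deduplicated chain there;
-- whether that happens depends on the run, so all self-pair inputs are excluded (conservative).
def Pre_create_max_min_list (relationship_dict : List (String × String)) : Prop :=
  ∀ p ∈ relationship_dict, p.1 ≠ p.2
instance (relationship_dict : List (String × String)) : Decidable (Pre_create_max_min_list relationship_dict) := by unfold Pre_create_max_min_list; infer_instance

def pvWitness_create_max_min_list : (List (String × String)) := [("max1", "min1"), ("min1", "max2")]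

def Spec_create_max_min_list (relationship_dict : List (String × String)) (out : List String) : Prop := out = create_max_min_list_alt relationship_dict
instance (relationship_dict : List (String × String)) (out : List String) : Decidable (Spec_create_max_min_list relationship_dict out) := by unfold Spec_create_max_min_list; infer_instance

-- ===== CLAIM (what is proved, stated in full; the proofs are below) =====
def Claim_equal_create_max_min_list : Prop := ∀ (relationship_dict : List (String × String)), Dom_create_max_min_list relationship_dict → Pre_create_max_min_list relationship_dict → Spec_create_max_min_list relationship_dict (create_max_min_list relationship_dict)

-- ===== LEMMAS AND PROOFS =====

-- the successor of (the first occurrence of) x in l; none if absent or last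
def pvNextIn : List String → String → Option String
  | [], _ => none
  | a :: t, x => if x = a then t.head? else pvNextIn t x

theorem pvNextIn_cons_self (x : String) (t : List String) : pvNextIn (x :: t) x = t.head? := by
  simp [pvNextIn]

theorem pvNextIn_cons_ne {x a : String} (t : List String) (h : x ≠ a) :
    pvNextIn (a :: t) x = pvNextIn t x := by
  simp [pvNextIn, h]

theorem pvNextIn_not_mem {l : List String} {x : String} (h : x ∉ l) : pvNextIn l x = none := by
  induction l with
  | nil => rfl
  | cons a t ih =>
    simp only [List.mem_cons, not_or] at h
    simp [pvNextIn, h.1, ih h.2]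

theorem pvNextIn_append_right {l1 : List String} (l2 : List String) {x : String} (h : x ∉ l1) :
    pvNextIn (l1 ++ l2) x = pvNextIn l2 x := by
  induction l1 with
  | nil => rfl
  | cons a t ih =>
    simp only [List.mem_cons, not_or] at h
    simpa [pvNextIn, h.1] using ih h.2

theorem pvNextIn_append_left {l1 : List String} (l2 : List String) {x : String} (h : x ∈ l1) :
    pvNextIn (l1 ++ l2) x = (pvNextIn l1 x).or l2.head? := by
  induction l1 with
  | nil => simp at h
  | cons a t ih =>
    by_cases hxa : x = a
    · subst hxa
      cases t with
      | nil => simp [pvNextIn]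
      | cons b t' => simp [pvNextIn]
    · have hxt : x ∈ t := by simpa [hxa] using h
      simpa [pvNextIn, hxa] using ih hxt

theorem pvSet_add_not_mem {s : PySem.Set String} {x : String} (h : x ∉ s) : s.add x = s ++ [x] := by
  simp [PySem.Set.add, PySem.Set.contains, h]

theorem pvNextIn_congr_prefix {l1 r r' : List String} {c x : String} (hx : x ∈ l1) :
    pvNextIn (l1 ++ c :: r) x = pvNextIn (l1 ++ c :: r') x := by
  rw [pvNextIn_append_left _ hx, pvNextIn_append_left _ hx]
  simp

-- the invariant tying A's list to B's pointer state
structure PVInv (L : List String) (st : PVState) : Prop where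
  nodup : L.Nodup
  head : st.head = L.head?
  tail : st.tail = L.getLast?
  mem : ∀ x, x ∈ st.placed ↔ x ∈ L
  len : st.placed.length = L.length
  nxt : ∀ x, st.nxt.get? x = pvNextIn L x
  prv : ∀ x, st.prv.get? x = pvNextIn L.reverse x

theorem pvWalk_eq (nxt : PySem.Dict String String) :
    ∀ L : List String, L.Nodup → (∀ x ∈ L, nxt.get? x = pvNextIn L x) →
      pvWalk nxt L.length L.head? = L := by
  intro L
  induction L with
  | nil => intro _ _; rfl
  | cons a t ih =>
    intro hnd h
    have ha : nxt.get? a = t.head? := by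
      simpa [pvNextIn_cons_self] using h a (by simp)
    have ht : pvWalk nxt t.length t.head? = t := by
      apply ih (hnd.of_cons)
      intro x hx
      have hxa : x ≠ a := by
        rintro rfl; exact (List.nodup_cons.mp hnd).1 hx
      rw [h x (by simp [hx]), pvNextIn_cons_ne t hxa]
    simp [pvWalk, List.length_cons, ha, ht]

set_option maxHeartbeats 1000000 in
theorem pvStep_inv (valsA : List String) (valsB : PySem.Set String)
    (hv : ∀ x, x ∈ valsB ↔ x ∈ valsA)
    {L : List String} {st : PVState} (inv : PVInv L st) {k v : String} (hkv : k ≠ v) :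
    PVInv (pvAStep valsA L (k, v)) (pvBStep valsB st (k, v)) := by
  by_cases hL : L = []
  · subst hL
    have hhead : st.head = none := by simpa using inv.head
    have hplaced : st.placed = [] := List.length_eq_zero_iff.mp (by simpa using inv.len)
    have hA : pvAStep valsA [] (k, v) = [k, v] := by simp [pvAStep]
    have hB : pvBStep valsB st (k, v) =
        { nxt := st.nxt.insert k v, prv := st.prv.insert v k,
          head := some k, tail := some v, placed := (st.placed.add k).add v } := by
      unfold pvBStep; rw [hhead]
    have hpl2 : (st.placed.add k).add v = [k, v] := by
      rw [hplaced]
      simp [PySem.Set.add, PySem.Set.contains, Ne.symm hkv]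
    rw [hA, hB]
    refine ⟨by simp [hkv], rfl, rfl, ?_, ?_, ?_, ?_⟩
    · intro x; show x ∈ (st.placed.add k).add v ↔ _; rw [hpl2]
    · show ((st.placed.add k).add v).length = _; rw [hpl2]
    · intro x
      show (st.nxt.insert k v).get? x = pvNextIn [k, v] x
      by_cases hxk : x = k
      · subst hxk; rw [PySem.Dict.get?_insert_self]; simp [pvNextIn]
      · rw [PySem.Dict.get?_insert_of_ne _ _ hxk, inv.nxt x, pvNextIn_not_mem (by simp)]
        by_cases hxv : x = v <;> simp [pvNextIn, hxk, hxv, Ne.symm hkv]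
    · intro x
      show (st.prv.insert v k).get? x = pvNextIn [k, v].reverse x
      by_cases hxv : x = v
      · subst hxv; rw [PySem.Dict.get?_insert_self]; simp [pvNextIn]
      · rw [PySem.Dict.get?_insert_of_ne _ _ hxv, inv.prv x, pvNextIn_not_mem (by simp)]
        by_cases hxk : x = k <;> simp [pvNextIn, hxk, hxv, hkv]
  · -- L nonempty
    obtain ⟨h0, hh⟩ : ∃ y, st.head = some y := by
      rw [inv.head]; cases L with
      | nil => exact absurd rfl hL
      | cons a t => exact ⟨a, rfl⟩
    have hlen0 : ¬ (L.length = 0) := by simpa [List.length_eq_zero_iff] using hL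
    by_cases hc1 : k ∈ L ∧ v ∉ L
    · -- k already in the chain, v new: insert v right after k
      obtain ⟨l1, l2, hdec⟩ := List.append_of_mem hc1.1
      subst hdec
      obtain ⟨nd1, ndc, disj⟩ := List.nodup_append.mp inv.nodup
      have hk1 : k ∉ l1 := fun hm => disj k hm k (by simp) rfl
      have hk2 : k ∉ l2 := (List.nodup_cons.mp ndc).1
      have hv1 : v ∉ l1 := fun hm => hc1.2 (by simp [hm])
      have hv2 : v ∉ l2 := fun hm => hc1.2 (by simp [hm])
      have hvp : v ∉ st.placed := fun h => hc1.2 ((inv.mem v).mp h)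
      have hidx : PySem.List.index? (l1 ++ k :: l2) k = some l1.length :=
        (PySem.List.index?_eq_some_iff _ _ _).mpr ⟨l1, l2, rfl, rfl, hk1⟩
      have hA : pvAStep valsA (l1 ++ k :: l2) (k, v) = l1 ++ k :: v :: l2 := by
        unfold pvAStep
        rw [if_neg hlen0, if_pos hc1]
        simp only [hidx, Option.getD_some]
        rw [show ((l1.length : Int) + 1) = ((l1.length + 1 : Nat) : Int) by push_cast; ring]
        rw [PySem.List.slice_to_natCast, PySem.List.slice_from_natCast,
            List.take_append, List.drop_append,
            List.take_of_length_le (by omega), List.drop_eq_nil_of_le (by omega)]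
        simp
      have hcond : k ∈ st.placed ∧ v ∉ st.placed := by
        rw [inv.mem k, inv.mem v]; exact hc1
      have hafter : st.nxt.get? k = l2.head? := by
        rw [inv.nxt k, pvNextIn_append_right _ hk1, pvNextIn_cons_self]
      cases l2 with
      | nil =>
        have hB : pvBStep valsB st (k, v) =
            ⟨st.nxt.insert k v, st.prv.insert v k, st.head, some v, st.placed.add v⟩ := by
          simp only [pvBStep, hh]
          rw [if_pos hcond, hafter]
          rfl
        rw [hA, hB]
        refine ⟨?_, ?_, ?_, ?_, ?_, ?_, ?_⟩
        · rw [List.nodup_append]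
          refine ⟨nd1, by simp [hkv], ?_⟩
          intro a ha b hb hab
          subst hab
          simp only [List.mem_cons, List.not_mem_nil, or_false] at hb
          rcases hb with rfl | rfl
          · exact disj a ha a (by simp) rfl
          · exact hv1 ha
        · show st.head = _
          rw [inv.head, List.head?_append, List.head?_append]
          rfl
        · show some v = _
          simp [List.getLast?_append]
        · intro x
          show x ∈ st.placed.add v ↔ _
          rw [PySem.Set.mem_add, inv.mem]
          simp only [List.mem_append, List.mem_cons, List.not_mem_nil, or_false]
          tauto
        · show (st.placed.add v).length = _
          rw [pvSet_add_not_mem hvp, List.length_append, List.length_append, inv.len]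
          simp
        · intro x
          show (st.nxt.insert k v).get? x = pvNextIn (l1 ++ k :: v :: []) x
          by_cases hxk : x = k
          · subst hxk
            rw [PySem.Dict.get?_insert_self, pvNextIn_append_right _ hk1, pvNextIn_cons_self]
            rfl
          · rw [PySem.Dict.get?_insert_of_ne _ _ hxk, inv.nxt x]
            by_cases hx1 : x ∈ l1
            · exact pvNextIn_congr_prefix hx1
            · rw [pvNextIn_append_right _ hx1, pvNextIn_append_right _ hx1,
                  pvNextIn_cons_ne _ hxk, pvNextIn_cons_ne _ hxk]
              by_cases hxv : x = v <;> simp [pvNextIn, hxv]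
        · intro x
          show (st.prv.insert v k).get? x = pvNextIn (l1 ++ k :: v :: []).reverse x
          rw [show (l1 ++ k :: v :: []).reverse = v :: k :: l1.reverse by simp]
          by_cases hxv : x = v
          · subst hxv
            rw [PySem.Dict.get?_insert_self, pvNextIn_cons_self]
            rfl
          · rw [PySem.Dict.get?_insert_of_ne _ _ hxv, inv.prv x,
                show (l1 ++ k :: []).reverse = k :: l1.reverse by simp,
                pvNextIn_cons_ne _ hxv]
      | cons a2 l2' =>
        have hB : pvBStep valsB st (k, v) =
            ⟨(st.nxt.insert k v).insert v a2, (st.prv.insert v k).insert a2 v,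
              st.head, st.tail, st.placed.add v⟩ := by
          simp only [pvBStep, hh]
          rw [if_pos hcond, hafter]
          rfl
        rw [hA, hB]
        have hka2 : k ≠ a2 := fun he => hk2 (by simp [he])
        have hva2 : v ≠ a2 := fun he => hv2 (by simp [he])
        have ha2l2' : a2 ∉ l2' := by
          have := (List.nodup_cons.mp ndc).2
          exact (List.nodup_cons.mp this).1
        have hvl2' : v ∉ l2' := fun hm => hv2 (by simp [hm])
        refine ⟨?_, ?_, ?_, ?_, ?_, ?_, ?_⟩
        · rw [List.nodup_append]
          refine ⟨nd1, ?_, ?_⟩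
          · rw [List.nodup_cons]
            refine ⟨?_, ?_⟩
            · simp only [List.mem_cons, not_or]
              exact ⟨hkv, hka2, fun hm => hk2 (by simp [hm])⟩
            · rw [List.nodup_cons]
              exact ⟨by simpa [hva2] using hvl2', (List.nodup_cons.mp ndc).2⟩
          · intro a ha b hb hab
            subst hab
            simp only [List.mem_cons] at hb
            rcases hb with rfl | rfl | hb
            · exact disj a ha a (by simp) rfl
            · exact hv1 ha
            · exact disj a ha a (by simp [hb]) rfl
        · show st.head = _
          rw [inv.head, List.head?_append, List.head?_append]
          rfl
        · show st.tail = _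
          rw [inv.tail, List.getLast?_append, List.getLast?_append]
          simp [List.getLast?_cons_cons]
        · intro x
          show x ∈ st.placed.add v ↔ _
          rw [PySem.Set.mem_add, inv.mem]
          simp only [List.mem_append, List.mem_cons]
          tauto
        · show (st.placed.add v).length = _
          rw [pvSet_add_not_mem hvp]
          simp only [inv.len, List.length_append, List.length_cons, List.length_nil]
          omega
        · intro x
          show ((st.nxt.insert k v).insert v a2).get? x = pvNextIn (l1 ++ k :: v :: a2 :: l2') x
          by_cases hxv : x = v
          · subst hxv
            rw [PySem.Dict.get?_insert_self, pvNextIn_append_right _ hv1,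
                pvNextIn_cons_ne _ (Ne.symm hkv), pvNextIn_cons_self]
            rfl
          · rw [PySem.Dict.get?_insert_of_ne _ _ hxv]
            by_cases hxk : x = k
            · subst hxk
              rw [PySem.Dict.get?_insert_self, pvNextIn_append_right _ hk1, pvNextIn_cons_self]
              rfl
            · rw [PySem.Dict.get?_insert_of_ne _ _ hxk, inv.nxt x]
              by_cases hx1 : x ∈ l1
              · exact pvNextIn_congr_prefix hx1
              · rw [pvNextIn_append_right _ hx1, pvNextIn_append_right _ hx1,
                    pvNextIn_cons_ne _ hxk, pvNextIn_cons_ne _ hxk, pvNextIn_cons_ne _ hxv]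
        · intro x
          show ((st.prv.insert v k).insert a2 v).get? x = pvNextIn (l1 ++ k :: v :: a2 :: l2').reverse x
          rw [show (l1 ++ k :: v :: a2 :: l2').reverse = l2'.reverse ++ a2 :: v :: k :: l1.reverse by simp]
          by_cases hxa2 : x = a2
          · subst hxa2
            rw [PySem.Dict.get?_insert_self,
                pvNextIn_append_right _ (by simpa using ha2l2'), pvNextIn_cons_self]
            rfl
          · rw [PySem.Dict.get?_insert_of_ne _ _ hxa2]
            by_cases hxv : x = v
            · subst hxv
              rw [PySem.Dict.get?_insert_self,
                  pvNextIn_append_right _ (by simpa using hvl2'),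
                  pvNextIn_cons_ne _ hxa2, pvNextIn_cons_self]
              rfl
            · rw [PySem.Dict.get?_insert_of_ne _ _ hxv, inv.prv x,
                  show (l1 ++ k :: a2 :: l2').reverse = l2'.reverse ++ a2 :: k :: l1.reverse by simp]
              by_cases hx2 : x ∈ l2'.reverse
              · exact pvNextIn_congr_prefix hx2
              · rw [pvNextIn_append_right _ hx2, pvNextIn_append_right _ hx2,
                    pvNextIn_cons_ne _ hxa2, pvNextIn_cons_ne _ hxa2, pvNextIn_cons_ne _ hxv]
    · by_cases hc2 : v ∈ L ∧ k ∉ L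
      · -- v already in the chain, k new: insert k right before v
        obtain ⟨l1, l2, hdec⟩ := List.append_of_mem hc2.1
        subst hdec
        obtain ⟨nd1, ndc, disj⟩ := List.nodup_append.mp inv.nodup
        have hv1 : v ∉ l1 := fun hm => disj v hm v (by simp) rfl
        have hv2 : v ∉ l2 := (List.nodup_cons.mp ndc).1
        have hk1 : k ∉ l1 := fun hm => hc2.2 (by simp [hm])
        have hk2 : k ∉ l2 := fun hm => hc2.2 (by simp [hm])
        have hkp : k ∉ st.placed := fun h => hc2.2 ((inv.mem k).mp h)
        have hidx : PySem.List.index? (l1 ++ v :: l2) v = some l1.length :=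
          (PySem.List.index?_eq_some_iff _ _ _).mpr ⟨l1, l2, rfl, rfl, hv1⟩
        have hA : pvAStep valsA (l1 ++ v :: l2) (k, v) = l1 ++ k :: v :: l2 := by
          unfold pvAStep
          rw [if_neg hlen0, if_neg hc1, if_pos hc2]
          simp only [hidx, Option.getD_some]
          rw [PySem.List.slice_to_natCast, PySem.List.slice_from_natCast]
          simp
        have hcond1 : ¬(k ∈ st.placed ∧ v ∉ st.placed) := by
          rw [inv.mem k, inv.mem v]; exact hc1
        have hcond2 : v ∈ st.placed ∧ k ∉ st.placed := by
          rw [inv.mem v, inv.mem k]; exact hc2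
        have hbefore : st.prv.get? v = l1.reverse.head? := by
          rw [inv.prv v,
              show (l1 ++ v :: l2).reverse = l2.reverse ++ v :: l1.reverse by simp,
              pvNextIn_append_right _ (by simpa using hv2), pvNextIn_cons_self]
        cases hl1r : l1.reverse with
        | nil =>
          have hl1 : l1 = [] := by simpa using congrArg List.reverse hl1r
          subst hl1
          have hB : pvBStep valsB st (k, v) =
              ⟨st.nxt.insert k v, st.prv.insert v k, some k, st.tail, st.placed.add k⟩ := by
            simp only [pvBStep, hh]
            rw [if_neg hcond1, if_pos hcond2, hbefore, hl1r]
            rfl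
          rw [hA, hB]
          refine ⟨?_, ?_, ?_, ?_, ?_, ?_, ?_⟩
          · simp only [List.nil_append, List.nodup_cons] at *
            refine ⟨?_, ndc⟩
            simp only [List.mem_cons, not_or]
            exact ⟨hkv, hk2⟩
          · rfl
          · show st.tail = _
            rw [inv.tail]
            simp [List.getLast?_cons_cons]
          · intro x
            show x ∈ st.placed.add k ↔ _
            rw [PySem.Set.mem_add, inv.mem]
            simp only [List.nil_append, List.mem_cons]
            tauto
          · show (st.placed.add k).length = _
            rw [pvSet_add_not_mem hkp]
            simp only [inv.len, List.length_append, List.length_cons, List.length_nil]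
            omega
          · intro x
            show (st.nxt.insert k v).get? x = pvNextIn ([] ++ k :: v :: l2) x
            simp only [List.nil_append]
            by_cases hxk : x = k
            · subst hxk
              rw [PySem.Dict.get?_insert_self, pvNextIn_cons_self]
              rfl
            · rw [PySem.Dict.get?_insert_of_ne _ _ hxk, inv.nxt x]
              simp only [List.nil_append]
              rw [pvNextIn_cons_ne _ hxk]
          · intro x
            show (st.prv.insert v k).get? x = pvNextIn ([] ++ k :: v :: l2).reverse x
            simp only [List.nil_append]
            rw [show (k :: v :: l2).reverse = l2.reverse ++ v :: k :: [] by simp]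
            by_cases hxv : x = v
            · subst hxv
              rw [PySem.Dict.get?_insert_self,
                  pvNextIn_append_right _ (by simpa using hv2), pvNextIn_cons_self]
              rfl
            · rw [PySem.Dict.get?_insert_of_ne _ _ hxv, inv.prv x]
              simp only [List.nil_append]
              rw [show (v :: l2).reverse = l2.reverse ++ v :: [] by simp]
              by_cases hx2 : x ∈ l2.reverse
              · exact pvNextIn_congr_prefix hx2
              · rw [pvNextIn_append_right _ hx2, pvNextIn_append_right _ hx2,
                    pvNextIn_cons_ne _ hxv, pvNextIn_cons_ne _ hxv]
                by_cases hxk : x = k <;> simp [pvNextIn, hxk]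
        | cons b r =>
          have hl1 : l1 = r.reverse ++ [b] := by
            rw [← List.reverse_reverse l1, hl1r]; simp
          have hB : pvBStep valsB st (k, v) =
              ⟨(st.nxt.insert k v).insert b k, (st.prv.insert v k).insert k b,
                st.head, st.tail, st.placed.add k⟩ := by
            simp only [pvBStep, hh]
            rw [if_neg hcond1, if_pos hcond2, hbefore, hl1r]
            rfl
          rw [hA, hB]
          have hbl1 : b ∈ l1 := by rw [hl1]; simp
          have hbr : b ∉ r.reverse := by
            have := nd1
            rw [hl1, List.nodup_append] at this
            exact fun hm => this.2.2 b hm b (by simp) rfl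
          have hkb : k ≠ b := fun he => hk1 (he ▸ hbl1)
          have hvb : v ≠ b := fun he => hv1 (he ▸ hbl1)
          have hl1ne : ∃ y, l1.head? = some y := by
            rw [hl1]
            cases hr : r.reverse with
            | nil => exact ⟨b, by simp⟩
            | cons c r' => exact ⟨c, by simp⟩
          obtain ⟨y0, hy0⟩ := hl1ne
          refine ⟨?_, ?_, ?_, ?_, ?_, ?_, ?_⟩
          · rw [List.nodup_append]
            refine ⟨nd1, ?_, ?_⟩
            · rw [List.nodup_cons]
              refine ⟨?_, ndc⟩
              simp only [List.mem_cons, not_or]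
              exact ⟨hkv, fun hm => hk2 hm⟩
            · intro a ha c hc hac
              subst hac
              simp only [List.mem_cons] at hc
              rcases hc with rfl | rfl | hc
              · exact hk1 ha
              · exact disj a ha a (by simp) rfl
              · exact disj a ha a (by simp [hc]) rfl
          · show st.head = _
            rw [inv.head, List.head?_append, List.head?_append, hy0]
            rfl
          · show st.tail = _
            rw [inv.tail, List.getLast?_append, List.getLast?_append]
            simp [List.getLast?_cons_cons]
          · intro x
            show x ∈ st.placed.add k ↔ _
            rw [PySem.Set.mem_add, inv.mem]
            simp only [List.mem_append, List.mem_cons]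
            tauto
          · show (st.placed.add k).length = _
            rw [pvSet_add_not_mem hkp]
            simp only [inv.len, List.length_append, List.length_cons, List.length_nil]
            omega
          · intro x
            show ((st.nxt.insert k v).insert b k).get? x = pvNextIn (l1 ++ k :: v :: l2) x
            rw [hl1,
                show r.reverse ++ [b] ++ k :: v :: l2 = r.reverse ++ b :: k :: v :: l2 by simp]
            by_cases hxb : x = b
            · subst hxb
              rw [PySem.Dict.get?_insert_self, pvNextIn_append_right _ hbr, pvNextIn_cons_self]
              rfl
            · rw [PySem.Dict.get?_insert_of_ne _ _ hxb]
              by_cases hxk : x = k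
              · subst hxk
                rw [PySem.Dict.get?_insert_self,
                    pvNextIn_append_right _ (fun hm => hk1 (by rw [hl1]; simp [hm])),
                    pvNextIn_cons_ne _ hxb, pvNextIn_cons_self]
                rfl
              · rw [PySem.Dict.get?_insert_of_ne _ _ hxk, inv.nxt x, hl1,
                    show r.reverse ++ [b] ++ v :: l2 = r.reverse ++ b :: v :: l2 by simp]
                by_cases hxr : x ∈ r.reverse
                · exact pvNextIn_congr_prefix hxr
                · rw [pvNextIn_append_right _ hxr, pvNextIn_append_right _ hxr,
                      pvNextIn_cons_ne _ hxb, pvNextIn_cons_ne _ hxb, pvNextIn_cons_ne _ hxk]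
          · intro x
            show ((st.prv.insert v k).insert k b).get? x = pvNextIn (l1 ++ k :: v :: l2).reverse x
            rw [show (l1 ++ k :: v :: l2).reverse = l2.reverse ++ v :: k :: l1.reverse by simp,
                hl1r]
            by_cases hxk : x = k
            · subst hxk
              rw [PySem.Dict.get?_insert_self,
                  pvNextIn_append_right _ (by simpa using hk2),
                  pvNextIn_cons_ne _ hkv, pvNextIn_cons_self]
              rfl
            · rw [PySem.Dict.get?_insert_of_ne _ _ hxk]
              by_cases hxv : x = v
              · subst hxv
                rw [PySem.Dict.get?_insert_self,
                    pvNextIn_append_right _ (by simpa using hv2), pvNextIn_cons_self]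
                rfl
              · rw [PySem.Dict.get?_insert_of_ne _ _ hxv, inv.prv x,
                    show (l1 ++ v :: l2).reverse = l2.reverse ++ v :: l1.reverse by simp,
                    hl1r]
                by_cases hx2 : x ∈ l2.reverse
                · exact pvNextIn_congr_prefix hx2
                · rw [pvNextIn_append_right _ hx2, pvNextIn_append_right _ hx2,
                      pvNextIn_cons_ne _ hxv, pvNextIn_cons_ne _ hxv, pvNextIn_cons_ne _ hxk]
      · by_cases hc3 : k ∈ L ∧ v ∈ L
        · -- both already in the chain: both sides unchanged
          have hA : pvAStep valsA L (k, v) = L := by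
            unfold pvAStep
            rw [if_neg hlen0, if_neg hc1, if_neg hc2, if_pos hc3]
          have hB : pvBStep valsB st (k, v) = st := by
            simp only [pvBStep, hh]
            rw [if_neg (show ¬(k ∈ st.placed ∧ v ∉ st.placed) by
                  rw [inv.mem k, inv.mem v]; exact hc1),
                if_neg (show ¬(v ∈ st.placed ∧ k ∉ st.placed) by
                  rw [inv.mem k, inv.mem v]; exact hc2),
                if_pos (show k ∈ st.placed ∧ v ∈ st.placed by
                  rw [inv.mem k, inv.mem v]; exact hc3)]
          rw [hA, hB]; exact inv
        · -- neither in the chain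
          have hk : k ∉ L := by tauto
          have hvL : v ∉ L := by tauto
          have hkp : k ∉ st.placed := fun h => hk ((inv.mem k).mp h)
          have hvp : v ∉ st.placed := fun h => hvL ((inv.mem v).mp h)
          have hcb1 : ¬(k ∈ st.placed ∧ v ∉ st.placed) := by
            rw [inv.mem k, inv.mem v]; exact hc1
          have hcb2 : ¬(v ∈ st.placed ∧ k ∉ st.placed) := by
            rw [inv.mem v, inv.mem k]; exact hc2
          have hcb3 : ¬(k ∈ st.placed ∧ v ∈ st.placed) := by
            rw [inv.mem k, inv.mem v]; exact hc3
          have hh0 : L.head? = some h0 := by rw [← inv.head, hh]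
          obtain ⟨t0, hL0⟩ : ∃ t0, L = h0 :: t0 := by
            cases L with
            | nil => exact absurd rfl hL
            | cons a t =>
                have ha : a = h0 := by simpa using hh0
                exact ⟨t, by rw [ha]⟩
          have hmem : ∀ x, x ∈ (st.placed.add k).add v ↔ x ∈ L ∨ (x = k ∨ x = v) := by
            intro x
            rw [PySem.Set.mem_add, PySem.Set.mem_add, inv.mem]
            tauto
          have hvpk : v ∉ st.placed.add k := by
            rw [PySem.Set.mem_add]
            rintro (h | h)
            · exact hvp h
            · exact hkv h.symm
          have hlen : ((st.placed.add k).add v).length = L.length + 2 := by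
            rw [pvSet_add_not_mem hvpk, pvSet_add_not_mem hkp]
            simp [inv.len]
          by_cases hkvals : k ∈ valsA
          · -- append [k, v] at the end
            have hA : pvAStep valsA L (k, v) = L ++ [k, v] := by
              unfold pvAStep
              rw [if_neg hlen0, if_neg hc1, if_neg hc2, if_neg hc3, if_pos hkvals]
            obtain ⟨tl, htl⟩ : ∃ y, st.tail = some y := by
              rw [inv.tail, hL0]; cases hx : (h0 :: t0).getLast? with
              | none => simp at hx
              | some y => exact ⟨y, rfl⟩
            have htlL : L.getLast? = some tl := by rw [← inv.tail, htl]
            obtain ⟨l0, hl0⟩ : ∃ l0, L = l0 ++ [tl] := List.getLast?_eq_some_iff.mp htlL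
            have htl0 : tl ∉ l0 := by
              have := inv.nodup
              rw [hl0, List.nodup_append] at this
              exact fun hm => this.2.2 tl hm tl (by simp) rfl
            have hB : pvBStep valsB st (k, v) =
                ⟨(st.nxt.insert tl k).insert k v, (st.prv.insert k tl).insert v k,
                  st.head, some v, (st.placed.add k).add v⟩ := by
              simp only [pvBStep, hh]
              rw [if_neg hcb1, if_neg hcb2, if_neg hcb3,
                  if_pos (show k ∈ valsB from (hv k).mpr hkvals), htl]
            rw [hA, hB]
            have hkl0 : k ∉ l0 := fun hm => hk (by rw [hl0]; simp [hm])
            have hvl0 : v ∉ l0 := fun hm => hvL (by rw [hl0]; simp [hm])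
            have hktl : k ≠ tl := fun he => hk (by rw [hl0, he]; simp)
            have hvtl : v ≠ tl := fun he => hvL (by rw [hl0, he]; simp)
            refine ⟨?_, ?_, ?_, ?_, ?_, ?_, ?_⟩
            · rw [List.nodup_append]
              refine ⟨inv.nodup, by simp [hkv], ?_⟩
              intro a ha b hb hab
              subst hab
              simp only [List.mem_cons, List.not_mem_nil, or_false] at hb
              rcases hb with rfl | rfl
              · exact hk ha
              · exact hvL ha
            · show st.head = _
              rw [inv.head, List.head?_append, hh0]; rfl
            · show some v = _
              rw [List.getLast?_append]; rfl
            · intro x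
              show x ∈ (st.placed.add k).add v ↔ _
              rw [hmem]
              simp only [List.mem_append, List.mem_cons, List.not_mem_nil, or_false]
              try tauto
            · show ((st.placed.add k).add v).length = _
              rw [hlen]; simp
            · intro x
              show ((st.nxt.insert tl k).insert k v).get? x = pvNextIn (L ++ [k, v]) x
              by_cases hxk : x = k
              · subst hxk
                rw [PySem.Dict.get?_insert_self, pvNextIn_append_right _ hk,
                    pvNextIn_cons_self]
                rfl
              · rw [PySem.Dict.get?_insert_of_ne _ _ hxk]
                by_cases hxtl : x = tl
                · subst hxtl
                  rw [PySem.Dict.get?_insert_self, hl0]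
                  rw [show l0 ++ [x] ++ [k, v] = l0 ++ x :: k :: v :: [] by simp]
                  rw [pvNextIn_append_right _ htl0, pvNextIn_cons_self]
                  rfl
                · rw [PySem.Dict.get?_insert_of_ne _ _ hxtl, inv.nxt x]
                  by_cases hxL : x ∈ L
                  · have hxl0 : x ∈ l0 := by
                      rw [hl0] at hxL; simpa [hxtl] using hxL
                    rw [hl0]
                    rw [show l0 ++ [tl] ++ [k, v] = l0 ++ tl :: k :: v :: [] by simp,
                        show l0 ++ [tl] = l0 ++ tl :: [] by simp]
                    exact pvNextIn_congr_prefix hxl0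
                  · rw [pvNextIn_not_mem hxL, pvNextIn_append_right _ hxL,
                        pvNextIn_cons_ne _ hxk]
                    by_cases hxv : x = v <;> simp [pvNextIn, hxv]
            · intro x
              show ((st.prv.insert k tl).insert v k).get? x = pvNextIn (L ++ [k, v]).reverse x
              rw [show (L ++ [k, v]).reverse = v :: k :: L.reverse by simp]
              by_cases hxv : x = v
              · subst hxv
                rw [PySem.Dict.get?_insert_self, pvNextIn_cons_self]
                rfl
              · rw [PySem.Dict.get?_insert_of_ne _ _ hxv]
                by_cases hxk : x = k
                · subst hxk
                  rw [PySem.Dict.get?_insert_self, pvNextIn_cons_ne _ hkv,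
                      pvNextIn_cons_self, hl0]
                  simp
                · rw [PySem.Dict.get?_insert_of_ne _ _ hxk, inv.prv x,
                      pvNextIn_cons_ne _ hxv, pvNextIn_cons_ne _ hxk]
          · -- prepend [k, v] in front
            have hA : pvAStep valsA L (k, v) = [k, v] ++ L := by
              unfold pvAStep
              rw [if_neg hlen0, if_neg hc1, if_neg hc2, if_neg hc3, if_neg hkvals]
            have hB : pvBStep valsB st (k, v) =
                ⟨(st.nxt.insert k v).insert v h0, (st.prv.insert v k).insert h0 v,
                  some k, st.tail, (st.placed.add k).add v⟩ := by
              simp only [pvBStep, hh]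
              rw [if_neg hcb1, if_neg hcb2, if_neg hcb3,
                  if_neg (show ¬ k ∈ valsB from fun hm => hkvals ((hv k).mp hm))]
            rw [hA, hB]
            have hh0t : h0 ∉ t0 := by
              have := inv.nodup
              rw [hL0, List.nodup_cons] at this
              exact this.1
            have hkh0 : k ≠ h0 := fun he => hk (by rw [hL0, he]; simp)
            have hvh0 : v ≠ h0 := fun he => hvL (by rw [hL0, he]; simp)
            refine ⟨?_, ?_, ?_, ?_, ?_, ?_, ?_⟩
            · rw [List.nodup_append]
              refine ⟨by simp [hkv], inv.nodup, ?_⟩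
              intro a ha b hb hab
              subst hab
              simp only [List.mem_cons, List.not_mem_nil, or_false] at ha
              rcases ha with rfl | rfl
              · exact hk hb
              · exact hvL hb
            · rfl
            · show st.tail = _
              rw [inv.tail, List.getLast?_append_of_ne_nil _ hL]
            · intro x
              show x ∈ (st.placed.add k).add v ↔ _
              rw [hmem]
              simp only [List.mem_append, List.mem_cons, List.not_mem_nil, or_false]
              try tauto
            · show ((st.placed.add k).add v).length = _
              rw [hlen, List.length_append]
              simp only [List.length_cons, List.length_nil]
              omega
            · intro x
              show ((st.nxt.insert k v).insert v h0).get? x = pvNextIn ([k, v] ++ L) x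
              rw [show [k, v] ++ L = k :: v :: L from rfl]
              by_cases hxv : x = v
              · subst hxv
                rw [PySem.Dict.get?_insert_self, pvNextIn_cons_ne _ (Ne.symm hkv), pvNextIn_cons_self, hh0]
              · rw [PySem.Dict.get?_insert_of_ne _ _ hxv]
                by_cases hxk : x = k
                · subst hxk
                  rw [PySem.Dict.get?_insert_self, pvNextIn_cons_self]
                  rfl
                · rw [PySem.Dict.get?_insert_of_ne _ _ hxk, inv.nxt x,
                      pvNextIn_cons_ne _ hxk, pvNextIn_cons_ne _ hxv]
            · intro x
              show ((st.prv.insert v k).insert h0 v).get? x = pvNextIn ([k, v] ++ L).reverse x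
              rw [show ([k, v] ++ L).reverse = L.reverse ++ v :: k :: [] by simp]
              by_cases hxh0 : x = h0
              · subst hxh0
                rw [PySem.Dict.get?_insert_self, hL0,
                    show (x :: t0).reverse = t0.reverse ++ x :: [] from by simp,
                    show t0.reverse ++ x :: [] ++ v :: k :: [] = t0.reverse ++ x :: v :: k :: [] by simp,
                    pvNextIn_append_right _ (by simpa using hh0t), pvNextIn_cons_self]
                rfl
              · rw [PySem.Dict.get?_insert_of_ne _ _ hxh0]
                by_cases hxv : x = v
                · subst hxv
                  rw [PySem.Dict.get?_insert_self,
                      pvNextIn_append_right _ (by simpa using hvL), pvNextIn_cons_self]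
                  rfl
                · rw [PySem.Dict.get?_insert_of_ne _ _ hxv, inv.prv x]
                  by_cases hxL : x ∈ L
                  · have hxt0 : x ∈ t0.reverse := by
                      rw [hL0] at hxL
                      simp only [List.mem_cons] at hxL
                      rcases hxL with rfl | hxt
                      · exact absurd rfl hxh0
                      · simpa using hxt
                    rw [hL0,
                        show (h0 :: t0).reverse = t0.reverse ++ h0 :: [] from by simp,
                        show t0.reverse ++ h0 :: [] ++ v :: k :: [] = t0.reverse ++ h0 :: v :: k :: [] by simp]
                    exact pvNextIn_congr_prefix hxt0
                  · have hxrev : x ∉ L.reverse := by simpa using hxL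
                    rw [pvNextIn_not_mem hxrev, pvNextIn_append_right _ hxrev,
                        pvNextIn_cons_ne _ hxv]
                    by_cases hxk : x = k <;> simp [pvNextIn, hxk]

theorem pvFold_inv (valsA : List String) (valsB : PySem.Set String)
    (hv : ∀ x, x ∈ valsB ↔ x ∈ valsA) :
    ∀ (items : List (String × String)), (∀ kv ∈ items, kv.1 ≠ kv.2) →
      ∀ L st, PVInv L st →
        PVInv (items.foldl (pvAStep valsA) L) (items.foldl (pvBStep valsB) st) := by
  intro items
  induction items with
  | nil => intro _ L st inv; exact inv
  | cons kv rest ih =>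
    intro h L st inv
    have h1 : kv.1 ≠ kv.2 := h kv (by simp)
    have step := pvStep_inv valsA valsB hv inv h1
    simpa using ih (fun p hp => h p (by simp [hp])) _ _ step

theorem pvMem_items_update (ps : List (String × String)) :
    ∀ (d : PySem.Dict String String) (p : String × String),
      p ∈ (d.update ps).items → p ∈ ps ∨ p ∈ d.items := by
  induction ps with
  | nil => intro d p h; exact Or.inr h
  | cons q rest ih =>
    intro d p h
    have h' : p ∈ ((d.insert q.1 q.2).update rest).items := by
      simpa [PySem.Dict.update] using h
    rcases ih (d.insert q.1 q.2) p h' with h1 | h2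
    · exact Or.inl (by simp [h1])
    · rcases (PySem.Dict.mem_items_insert d q.1 q.2 p).mp h2 with h3 | ⟨hm, _⟩
      · exact Or.inl (by simp [h3])
      · exact Or.inr hm

theorem pvItems_ofList_sub {l : List (String × String)} :
    ∀ p ∈ (PySem.Dict.ofList l).items, p ∈ l := by
  intro p hp
  have := pvMem_items_update l PySem.Dict.empty p (by simpa [PySem.Dict.ofList] using hp)
  simpa [PySem.Dict.empty, PySem.Dict.items] using this

theorem pvInv_init : PVInv [] ⟨PySem.Dict.empty, PySem.Dict.empty, none, none, PySem.Set.empty⟩ := by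
  constructor <;> simp [PySem.Set.empty, PySem.Dict.get?_empty, pvNextIn]

-- ===== VERDICT (by name: the statement is the Claim_ definition above) =====
theorem create_max_min_list_spec : Claim_equal_create_max_min_list := by
  intro rd _ hpre
  unfold Spec_create_max_min_list create_max_min_list create_max_min_list_alt
  set d := PySem.Dict.ofList rd with hd
  have hne : ∀ kv ∈ d.items, kv.1 ≠ kv.2 := fun kv hkv => hpre kv (pvItems_ofList_sub kv hkv)
  have hv : ∀ x, x ∈ PySem.Set.ofList d.values ↔ x ∈ d.values := fun x =>
    PySem.Set.mem_ofList d.values x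
  have inv := pvFold_inv d.values (PySem.Set.ofList d.values) hv d.items hne [] _ pvInv_init
  set L := d.items.foldl (pvAStep d.values) [] with hL
  set st := d.items.foldl (pvBStep (PySem.Set.ofList d.values)) ⟨PySem.Dict.empty, PySem.Dict.empty, none, none, PySem.Set.empty⟩ with hst
  have hw : pvWalk st.nxt L.length L.head? = L :=
    pvWalk_eq st.nxt L inv.nodup (fun x _ => inv.nxt x)
  have hfin : pvWalk st.nxt st.placed.length st.head = L := by
    rw [inv.len, inv.head]; exact hw
  exact hfin.symm
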